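-- pv_equiv track=rewrite | github.com/Samsung/CAS | bas/clang.py | extract_comp_file
-- ===== SOURCE A (Python) =====
-- from typing import List, Tuple
--
-- def extract_comp_file(argv: List[str], cwd: str, tailopts: List[str]) -> str:
--     i = 0
--     loc_arg = argv.copy()
--     try:
--         o_pos = argv.index("-o")
--         loc_arg.pop(o_pos+1)
--         loc_arg.pop(o_pos)
--     except ValueError:
--         pass
--
--     for i, u in enumerate(reversed(loc_arg)):
--         if u.startswith("-fdump-preamble=") or u.startswith("-no-opaque-pointers"):
--             continue
--         if u not in tailopts:
--             break
--     return loc_arg[-1-i]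
-- ===== SOURCE B (Python) =====
-- def extract_comp_file(argv, cwd, tailopts):
--     if "-o" in argv:
--         j = argv.index("-o")
--         loc = argv[:j] + argv[j + 2:]
--     else:
--         loc = argv
--     tail = set(tailopts)
--     kept = [u for u in loc
--             if not (u.startswith("-fdump-preamble=")
--                     or u.startswith("-no-opaque-pointers"))
--             and u not in tail]
--     return kept[-1] if kept else loc[0]
-- ===== Notes on version B (the rewrite author's own statement) =====
-- stated objective: simpler
-- what changed: A's reverse enumerate scan with break, per-element linear 'u in tailopts' list test and loc_arg[-1-i] index arithmetic is replaced by a forward filter against a set of tailopts, taking the last kept element (falling back to loc[0]); the -o removal is a slice concatenation instead of two pops.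
import Mathlib
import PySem

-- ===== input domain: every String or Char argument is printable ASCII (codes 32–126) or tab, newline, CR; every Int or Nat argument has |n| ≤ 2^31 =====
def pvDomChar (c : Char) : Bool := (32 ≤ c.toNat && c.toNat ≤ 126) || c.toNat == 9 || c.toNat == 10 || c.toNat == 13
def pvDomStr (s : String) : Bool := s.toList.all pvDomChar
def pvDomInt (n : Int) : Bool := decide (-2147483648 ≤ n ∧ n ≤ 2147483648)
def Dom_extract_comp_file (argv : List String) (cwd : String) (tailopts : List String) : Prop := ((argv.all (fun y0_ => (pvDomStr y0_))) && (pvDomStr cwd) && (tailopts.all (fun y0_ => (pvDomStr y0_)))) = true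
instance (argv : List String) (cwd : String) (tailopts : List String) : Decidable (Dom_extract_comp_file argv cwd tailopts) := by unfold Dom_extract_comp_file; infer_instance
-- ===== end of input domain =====

-- B replaces A's reverse enumerate scan + break + loc_arg[-1-i] index arithmetic by a forward
-- filter of the real arguments (tail options kept in a set) and taking the last kept one
-- (objective: simpler).


-- ===== PORT A =====
def pvSkipPrefix (u : String) : Bool :=
  PySem.Str.startswith u "-fdump-preamble=" || PySem.Str.startswith u "-no-opaque-pointers"

-- the try/except block: loc_arg = argv.copy(); pop(o_pos+1); pop(o_pos) if "-o" is found
def pvALoc (argv : List String) : List String :=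
  match PySem.List.index? argv "-o" with
  | some o_pos =>
    match PySem.List.pop? argv ((o_pos : Int) + 1) with
    | some (_, l1) =>
      match PySem.List.pop? l1 (o_pos : Int) with
      | some (_, l2) => l2
      | none => []          -- unreachable
    | none => []            -- IndexError from pop(o_pos+1): excluded by Pre_
  | none => argv            -- ValueError: pass

-- the 'for i, u in enumerate(reversed(loc_arg))' loop: i is the loop counter, prev the value
-- Python's i is left holding when the iterable is exhausted (its last assigned value)
def pvALoop (tailopts : List String) (i : Nat) (prev : Nat) : List String → Nat
  | [] => prev
  | u :: rest =>
    if pvSkipPrefix u then pvALoop tailopts (i + 1) i rest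
    else if !(tailopts.contains u) then i
    else pvALoop tailopts (i + 1) i rest

def extract_comp_file (argv : List String) (cwd : String) (tailopts : List String) : String :=
  let loc_arg := pvALoc argv
  let i := pvALoop tailopts 0 0 loc_arg.reverse
  (PySem.List.pyGet? loc_arg (-1 - (i : Int))).getD ""   -- none = IndexError: excluded by Pre_

-- ===== PORT B =====
def pvKeep (tail : PySem.Set String) (u : String) : Bool :=
  !(PySem.Str.startswith u "-fdump-preamble=" || PySem.Str.startswith u "-no-opaque-pointers")
  && !(tail.contains u)

-- loc = argv[:j] + argv[j+2:] if "-o" in argv else argv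
def pvBLoc (argv : List String) : List String :=
  match PySem.List.index? argv "-o" with
  | some j => PySem.List.slice argv none (some (j : Int)) ++ PySem.List.slice argv (some ((j : Int) + 2)) none
  | none => argv

def extract_comp_file_alt (argv : List String) (cwd : String) (tailopts : List String) : String :=
  let loc := pvBLoc argv
  let tail := PySem.Set.ofList tailopts
  let kept := loc.filter (pvKeep tail)
  match kept.getLast? with
  | some x => x                                 -- kept[-1]
  | none => (PySem.List.pyGet? loc 0).getD ""   -- loc[0]; none = IndexError: excluded by Pre_

-- ===== PRECONDITION & SPEC =====
-- Pre_ excludes exactly the inputs where A raises: an IndexError from pop(o_pos+1) when '-o' is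
-- the last element, and an IndexError from loc_arg[-1-i] when loc_arg is empty after the removal.
def Pre_extract_comp_file (argv : List String) (cwd : String) (tailopts : List String) : Prop :=
  (match PySem.List.index? argv "-o" with
   | some j => decide (j + 1 < argv.length ∧ 3 ≤ argv.length)
   | none => !argv.isEmpty) = true
instance (argv : List String) (cwd : String) (tailopts : List String) : Decidable (Pre_extract_comp_file argv cwd tailopts) := by unfold Pre_extract_comp_file; infer_instance

def pvWitness_extract_comp_file : List String × String × List String := (["a", "b"], "", ["b"])

def Spec_extract_comp_file (argv : List String) (cwd : String) (tailopts : List String) (out : String) : Prop := out = extract_comp_file_alt argv cwd tailopts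
instance (argv : List String) (cwd : String) (tailopts : List String) (out : String) : Decidable (Spec_extract_comp_file argv cwd tailopts out) := by unfold Spec_extract_comp_file; infer_instance

-- ===== CLAIM (what is proved, stated in full; the proofs are below) =====
def Claim_equal_extract_comp_file : Prop := ∀ (argv : List String) (cwd : String) (tailopts : List String), Dom_extract_comp_file argv cwd tailopts → Pre_extract_comp_file argv cwd tailopts → Spec_extract_comp_file argv cwd tailopts (extract_comp_file argv cwd tailopts)

-- ===== LEMMAS AND PROOFS =====

-- A's loop returns the index (in the reversed list) of the first kept element, and the last
-- enumerate index (length - 1) when nothing breaks the loop.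
theorem pvALoop_eq (ts : List String) (r : List String) : ∀ (i prev : Nat),
    pvALoop ts i prev r =
      match r.findIdx? (pvKeep (PySem.Set.ofList ts)) with
      | some k => i + k
      | none => if r.isEmpty then prev else i + r.length - 1 := by
  induction r with
  | nil => intro i prev; simp [pvALoop]
  | cons u rest ih =>
    intro i prev
    rw [List.findIdx?_cons]
    by_cases hk : pvKeep (PySem.Set.ofList ts) u = true
    · have hk' := hk
      unfold pvKeep at hk'
      rw [Bool.and_eq_true, Bool.not_eq_true', Bool.not_eq_true'] at hk'
      obtain ⟨hs, hc⟩ := hk'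
      have hs' : pvSkipPrefix u = false := hs
      have hm : u ∉ ts := by
        intro h
        have : u ∈ PySem.Set.ofList ts := (PySem.Set.mem_ofList ts u).mpr h
        simp_all
      simp [pvALoop, hs', hm, hk]
    · have h' : pvALoop ts i prev (u :: rest) = pvALoop ts (i + 1) i rest := by
        rw [pvKeep] at hk
        rw [Bool.and_eq_true, Bool.not_eq_true', Bool.not_eq_true'] at hk
        by_cases hs : pvSkipPrefix u = true
        · simp [pvALoop, hs]
        · have hs' : (PySem.Str.startswith u "-fdump-preamble=" || PySem.Str.startswith u "-no-opaque-pointers") = false := by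
            simpa [pvSkipPrefix] using hs
          have hc : (PySem.Set.ofList ts).contains u = true := by
            rcases Bool.eq_false_or_eq_true ((PySem.Set.ofList ts).contains u) with h | h
            · exact h
            · exact absurd ⟨hs', h⟩ hk
          have hm : u ∈ ts := by
            have : u ∈ PySem.Set.ofList ts := by simpa using hc
            exact (PySem.Set.mem_ofList ts u).mp this
          simp [pvALoop, hs, hm]
      rw [h', ih]
      simp only [hk, Bool.false_eq_true, if_false]
      cases hf : rest.findIdx? (pvKeep (PySem.Set.ofList ts)) with
      | some k => show i + 1 + k = i + (k + 1); omega
      | none =>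
        simp only [Option.map_none]
        cases rest with
        | nil => simp
        | cons v vs => simp [List.isEmpty]; omega

theorem pvALoop_eq_some (ts r : List String) (i prev k : Nat)
    (hf : r.findIdx? (pvKeep (PySem.Set.ofList ts)) = some k) : pvALoop ts i prev r = i + k := by
  rw [pvALoop_eq, hf]

theorem pvALoop_eq_none (ts r : List String) (i prev : Nat)
    (hf : r.findIdx? (pvKeep (PySem.Set.ofList ts)) = none) (hne : r ≠ []) :
    pvALoop ts i prev r = i + r.length - 1 := by
  rw [pvALoop_eq, hf]; simp [hne]

-- two pops at o_pos+1 then o_pos = dropping both elements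
theorem pvErase2 (l : List String) (j : Nat) (h : j + 1 < l.length) :
    (l.eraseIdx (j + 1)).eraseIdx j = l.take j ++ l.drop (j + 2) := by
  induction l generalizing j with
  | nil => simp at h
  | cons x xs ih =>
    cases j with
    | zero =>
      cases xs with
      | nil => simp at h
      | cons y ys => simp [List.eraseIdx]
    | succ j' =>
      simp [List.eraseIdx]
      exact ih j' (by simpa using h)

theorem pvFind?_of_findIdx? {α : Type} (r : List α) (p : α → Bool) (k : Nat)
    (hf : r.findIdx? p = some k) : r.find? p = r[k]? := by
  induction r generalizing k with
  | nil => simp at hf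
  | cons x xs ih =>
    rw [List.findIdx?_cons] at hf
    by_cases hp : p x = true
    · simp [hp] at hf; simp [List.find?_cons_of_pos hp, ← hf]
    · have hp' : p x = false := by simpa using hp
      simp only [hp', Bool.false_eq_true, if_false] at hf
      cases hg : xs.findIdx? p with
      | none => rw [hg] at hf; simp at hf
      | some k' =>
        rw [hg] at hf; simp at hf
        rw [List.find?_cons_of_neg hp, ih k' hg, ← hf]
        simp

-- under Pre_, A's two pops and B's slice concatenation build the same list …
theorem pvBLoc_eq_ALoc (argv : List String) (cwd : String) (tailopts : List String)
    (hpre : Pre_extract_comp_file argv cwd tailopts) : pvBLoc argv = pvALoc argv := by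
  unfold Pre_extract_comp_file at hpre
  unfold pvALoc pvBLoc
  cases h : PySem.List.index? argv "-o" with
  | none => rfl
  | some j =>
    rw [h] at hpre
    simp only [decide_eq_true_eq] at hpre
    obtain ⟨h1, _⟩ := hpre
    have h2 : j < (argv.eraseIdx (j + 1)).length := by
      rw [List.length_eraseIdx_of_lt h1]; omega
    have key1 : PySem.List.pop? argv ((j : Int) + 1) = some (argv[j + 1], argv.eraseIdx (j + 1)) := by
      rw [show ((j : Int) + 1) = ((j + 1 : Nat) : Int) by push_cast; ring]
      exact PySem.List.pop?_natCast _ _ h1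
    have key2 : PySem.List.pop? (argv.eraseIdx (j + 1)) ((j : Int)) = some ((argv.eraseIdx (j + 1))[j], (argv.eraseIdx (j + 1)).eraseIdx j) := by
      exact PySem.List.pop?_natCast _ _ h2
    have e2 : ((j : Int) + 2) = ((j + 2 : Nat) : Int) := by push_cast; ring
    simp only [key1, key2, e2, PySem.List.slice_to_natCast, PySem.List.slice_from_natCast]
    exact (pvErase2 argv j h1).symm

-- … and it is nonempty
theorem pvALoc_ne_nil (argv : List String) (cwd : String) (tailopts : List String)
    (hpre : Pre_extract_comp_file argv cwd tailopts) : pvALoc argv ≠ [] := by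
  unfold Pre_extract_comp_file at hpre
  unfold pvALoc
  cases h : PySem.List.index? argv "-o" with
  | none =>
    rw [h] at hpre; simpa using hpre
  | some j =>
    rw [h] at hpre
    simp only [decide_eq_true_eq] at hpre
    obtain ⟨h1, h3⟩ := hpre
    have h2 : j < (argv.eraseIdx (j + 1)).length := by
      rw [List.length_eraseIdx_of_lt h1]; omega
    have key1 : PySem.List.pop? argv ((j : Int) + 1) = some (argv[j + 1], argv.eraseIdx (j + 1)) := by
      rw [show ((j : Int) + 1) = ((j + 1 : Nat) : Int) by push_cast; ring]
      exact PySem.List.pop?_natCast _ _ h1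
    have key2 : PySem.List.pop? (argv.eraseIdx (j + 1)) ((j : Int)) = some ((argv.eraseIdx (j + 1))[j], (argv.eraseIdx (j + 1)).eraseIdx j) := by
      exact PySem.List.pop?_natCast _ _ h2
    simp only [key1, key2]
    intro hnil
    have := congrArg List.length hnil
    rw [List.length_eraseIdx_of_lt h2, List.length_eraseIdx_of_lt h1] at this
    simp at this
    omega

-- the heart: on a nonempty list, A's reverse-scan + negative index equals B's filter + last
theorem pvMain (ts L : List String) (hL : L ≠ []) :
    (PySem.List.pyGet? L (-1 - ((pvALoop ts 0 0 L.reverse : Nat) : Int))).getD "" =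
      (match (L.filter (pvKeep (PySem.Set.ofList ts))).getLast? with
       | some x => x
       | none => (PySem.List.pyGet? L 0).getD "") := by
  have hLpos : 0 < L.length := List.length_pos_iff.mpr hL
  cases hf : L.reverse.findIdx? (pvKeep (PySem.Set.ofList ts)) with
  | some k =>
    have hk : k < L.length := by
      have := (List.findIdx?_eq_some_iff_findIdx_eq.mp hf).1
      simpa using this
    rw [pvALoop_eq_some ts L.reverse 0 0 k hf]
    have e1 : (-1 - ((0 + k : Nat) : Int)) = -((k + 1 : Nat) : Int) := by push_cast; ring
    rw [e1, PySem.List.pyGet?_neg_natCast L (k + 1) (by omega) (by omega)]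
    have hB : (L.filter (pvKeep (PySem.Set.ofList ts))).getLast? = L.reverse[k]? := by
      rw [List.getLast?_eq_head?_reverse, ← List.filter_reverse, List.head?_filter]
      exact pvFind?_of_findIdx? L.reverse (pvKeep (PySem.Set.ofList ts)) k hf
    rw [hB, List.getElem?_reverse (by simpa using hk)]
    have e3 : L.length - 1 - k = L.length - (k + 1) := by omega
    rw [e3]
    have hlt : L.length - (k + 1) < L.length := by omega
    rw [List.getElem?_eq_getElem hlt]
    rfl
  | none =>
    have hrne : L.reverse ≠ [] := by simpa using hL
    rw [pvALoop_eq_none ts L.reverse 0 0 hf hrne]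
    have hfilter : L.filter (pvKeep (PySem.Set.ofList ts)) = [] := by
      rw [List.filter_eq_nil_iff]
      intro x hx
      have := List.findIdx?_eq_none_iff.mp hf x (by simpa using hx)
      simp [this]
    rw [hfilter]
    have e2 : (-1 - ((0 + L.reverse.length - 1 : Nat) : Int)) = -((L.length : Nat) : Int) := by
      rw [List.length_reverse]
      have : (0 + L.length - 1 : Nat) = L.length - 1 := by omega
      rw [this]
      push_cast [Nat.cast_sub (by omega : 1 ≤ L.length)]
      ring
    rw [e2, PySem.List.pyGet?_neg_natCast L L.length (by omega) (by omega), PySem.List.pyGet?_zero]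
    simp

-- ===== VERDICT (by name: the statement is the Claim_ definition above) =====
theorem extract_comp_file_spec : Claim_equal_extract_comp_file := by
  intro argv cwd tailopts _ hpre
  unfold Spec_extract_comp_file extract_comp_file extract_comp_file_alt
  rw [pvBLoc_eq_ALoc argv cwd tailopts hpre]
  exact pvMain tailopts (pvALoc argv) (pvALoc_ne_nil argv cwd tailopts hpre)
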